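-- pv_equiv track=rewrite | github.com/mzhalverson/comp524 | maccipher.py | encode64
-- ===== SOURCE A (Python) =====
-- def encode64(m):
--     alph = ['A','B','C','D','E','F','G','H','I','J','K','L','M','N','O','P','Q','R','S','T','U','V','W','X','Y','Z','a','b','c','d','e','f','g','h','i','j','k','l','m','n','o','p','q','r','s','t','u','v','w','x','y','z','0','1','2','3','4','5','6','7','8','9','+','/']
--     # number 00, 01, 02, 03, 04, 05, 06, 07, 08, 09, 10, 11, 12, 13, 14, 15, 16, 17, 18, 19, 20, 21, 22, 23, 24, 25, 26,27, 28, 29, 30, 31,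
--     base64 = range(0,64)
--     m_num = [0 for i in range(0,len(m))]
--     i=0
--     while i < len(m):
--         j=0
--         while j <= 63:
--             if m[i] == alph[j]:
--                 m_num[i] = base64[j]
--             j = j + 1
--         i = i+1
--     return m_num
-- ===== SOURCE B (Python) =====
-- def encode64(m):
--     out = []
--     for c in m:
--         if 'A' <= c <= 'Z':
--             out.append(ord(c) - ord('A'))
--         elif 'a' <= c <= 'z':
--             out.append(ord(c) - ord('a') + 26)
--         elif '0' <= c <= '9':
--             out.append(ord(c) - ord('0') + 52)
--         elif c == '+':
--             out.append(62)
--         elif c == '/':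
--             out.append(63)
--         else:
--             out.append(0)
--     return out
-- ===== Notes on version B (the rewrite author's own statement) =====
-- stated objective: faster
-- what changed: Replaces the per-character 64-step linear scan over the base64 alphabet (and the preallocated-then-mutated result list) with a single pass that classifies each character by closed-form range arithmetic on its code point and appends the index.
import Mathlib
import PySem

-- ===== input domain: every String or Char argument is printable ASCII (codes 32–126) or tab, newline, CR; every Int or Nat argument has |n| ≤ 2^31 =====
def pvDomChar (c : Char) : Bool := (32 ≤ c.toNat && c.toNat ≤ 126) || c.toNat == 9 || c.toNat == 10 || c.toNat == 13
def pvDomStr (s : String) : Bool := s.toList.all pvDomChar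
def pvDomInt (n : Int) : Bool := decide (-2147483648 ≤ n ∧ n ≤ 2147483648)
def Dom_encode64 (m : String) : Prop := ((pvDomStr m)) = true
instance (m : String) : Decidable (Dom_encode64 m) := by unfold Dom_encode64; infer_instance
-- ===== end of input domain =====

-- B replaces A's per-character 64-step alphabet scan (into a preallocated, mutated list)
-- with a single pass using closed-form range arithmetic on the character code (objective: faster, constant factor).

-- ===== PORT A =====
-- A's alphabet table (module-level in spirit; a local list in A)
def pvAlph : List Char :=
  ['A','B','C','D','E','F','G','H','I','J','K','L','M','N','O','P','Q','R','S','T','U','V','W','X','Y','Z',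
   'a','b','c','d','e','f','g','h','i','j','k','l','m','n','o','p','q','r','s','t','u','v','w','x','y','z',
   '0','1','2','3','4','5','6','7','8','9','+','/']

-- literal port of A: m_num = [0]*len(m); for i in range(len(m)): for j in range(64):
--   if m[i] == alph[j]: m_num[i] = base64[j]  (base64[j] = j; indices are always in range, getD is exact here)
def encode64 (m : String) : List Int :=
  let cs := m.toList
  (List.range cs.length).foldl
    (fun mnum i =>
      (List.range 64).foldl
        (fun mn j => if cs.getD i ' ' = pvAlph.getD j ' ' then mn.set i (j : Int) else mn)
        mnum)
    (List.replicate cs.length 0)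

-- ===== PORT B =====
-- closed-form classification of one character (B's if/elif chain)
def encAltChar (c : Char) : Int :=
  if 'A' ≤ c ∧ c ≤ 'Z' then (c.toNat : Int) - 65
  else if 'a' ≤ c ∧ c ≤ 'z' then (c.toNat : Int) - 97 + 26
  else if '0' ≤ c ∧ c ≤ '9' then (c.toNat : Int) - 48 + 52
  else if c = '+' then 62
  else if c = '/' then 63
  else 0

-- B's for-append loop over the characters of m
def encode64_alt (m : String) : List Int := m.toList.map encAltChar

-- ===== PRECONDITION & SPEC =====
def Spec_encode64 (m : String) (out : List Int) : Prop := out = encode64_alt m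
instance (m : String) (out : List Int) : Decidable (Spec_encode64 m out) := by unfold Spec_encode64; infer_instance

-- ===== CLAIM (what is proved, stated in full; the proofs are below) =====
def Claim_equal_encode64 : Prop := ∀ (m : String), Dom_encode64 m → Spec_encode64 m (encode64 m)

-- ===== LEMMAS AND PROOFS =====

-- every in-range table entry is a member of the table
theorem pv_getD_mem : ∀ j ∈ List.range 64, pvAlph.getD j ' ' ∈ pvAlph := by decide

-- an unmatched inner scan leaves the list unchanged
theorem pv_inner_keep (c : Char) (i : Nat) (l : List Nat) (mn : List Int)
    (h : ∀ j ∈ l, c ≠ pvAlph.getD j ' ') :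
    l.foldl (fun mn j => if c = pvAlph.getD j ' ' then mn.set i (j : Int) else mn) mn = mn := by
  induction l generalizing mn with
  | nil => rfl
  | cons a t ih =>
    rw [List.foldl_cons, if_neg (h a (by simp))]
    exact ih mn fun j hj => h j (by simp [hj])

-- facts about the table, checked by computation
theorem pv_iff : ∀ c ∈ pvAlph, ∀ j ∈ List.range 64,
    ((c = pvAlph.getD j ' ') ↔ j = pvAlph.idxOf c) := by
  intro c hc; fin_cases hc <;> decide

theorem pv_idx : ∀ c ∈ pvAlph, encAltChar c = (pvAlph.idxOf c : Int) := by
  intro c hc; fin_cases hc <;> decide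

theorem pv_idx_mem : ∀ c ∈ pvAlph, pvAlph.idxOf c ∈ List.range 64 := by
  intro c hc; fin_cases hc <;> decide

-- a scan whose condition holds exactly at index j' writes j' at position i
theorem pv_fold_unique (c : Char) (i : Nat) (j' : Nat) (l : List Nat) (mn : List Int)
    (hiff : ∀ j ∈ l, (c = pvAlph.getD j ' ') ↔ j = j') (hmem : j' ∈ l) :
    l.foldl (fun mn j => if c = pvAlph.getD j ' ' then mn.set i (j : Int) else mn) mn
      = mn.set i (j' : Int) := by
  induction l generalizing mn with
  | nil => cases hmem
  | cons a t ih =>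
    rw [List.foldl_cons]
    by_cases ha : a = j'
    · subst ha
      rw [if_pos ((hiff a (by simp)).mpr rfl)]
      by_cases ht : a ∈ t
      · rw [ih (mn.set i (a : Int)) (fun j hj => hiff j (by simp [hj])) ht, List.set_set]
      · exact pv_inner_keep c i t _ (fun j hj hc => ht (((hiff j (by simp [hj])).mp hc) ▸ hj))
    · have hmem' : j' ∈ t := List.mem_of_ne_of_mem (fun h => ha h.symm) hmem
      rw [if_neg (fun hc => ha ((hiff a (by simp)).mp hc))]
      exact ih mn (fun j hj => hiff j (by simp [hj])) hmem'

-- matched inner scan: write the closed-form value at position i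
theorem pv_inner_mem (c : Char) (hc : c ∈ pvAlph) (i : Nat) (mn : List Int) :
    (List.range 64).foldl
      (fun mn j => if c = pvAlph.getD j ' ' then mn.set i (j : Int) else mn) mn
      = mn.set i (encAltChar c) := by
  rw [pv_fold_unique c i (pvAlph.idxOf c) _ mn (pv_iff c hc) (pv_idx_mem c hc), pv_idx c hc]

-- characters in each code range are members of the table
theorem pv_mem_of_range (c : Char)
    (h : (65 ≤ c.toNat ∧ c.toNat ≤ 90) ∨ (97 ≤ c.toNat ∧ c.toNat ≤ 122) ∨
         (48 ≤ c.toNat ∧ c.toNat ≤ 57) ∨ c.toNat = 43 ∨ c.toNat = 47) : c ∈ pvAlph := by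
  have hofNat : c = Char.ofNat c.toNat := (Char.ofNat_toNat c).symm
  have hb : c.toNat < 123 := by omega
  rw [hofNat]
  interval_cases h' : c.toNat <;> simp_all <;> decide

-- outside the table the closed form yields 0
theorem pv_alt_nomem (c : Char) (hc : c ∉ pvAlph) : encAltChar c = 0 := by
  have hle : ∀ a b : Char, a ≤ b → a.toNat ≤ b.toNat := fun a b h => Fin.mk_le_mk.mp h
  have heq : ∀ a b : Char, a = b → a.toNat = b.toNat := fun a b h => by rw [h]
  unfold encAltChar
  rw [if_neg, if_neg, if_neg, if_neg, if_neg]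
  · intro h; exact hc (pv_mem_of_range c (Or.inr (Or.inr (Or.inr (Or.inr (heq _ _ h))))))
  · intro h; exact hc (pv_mem_of_range c (Or.inr (Or.inr (Or.inr (Or.inl (heq _ _ h))))))
  · rintro ⟨h1, h2⟩
    exact hc (pv_mem_of_range c (Or.inr (Or.inr (Or.inl ⟨hle _ _ h1, hle _ _ h2⟩))))
  · rintro ⟨h1, h2⟩
    exact hc (pv_mem_of_range c (Or.inr (Or.inl ⟨hle _ _ h1, hle _ _ h2⟩)))
  · rintro ⟨h1, h2⟩
    exact hc (pv_mem_of_range c (Or.inl ⟨hle _ _ h1, hle _ _ h2⟩))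

-- main invariant of A's outer loop
theorem pv_outer (cs : List Char) (k : Nat) (hk : k ≤ cs.length) :
    (List.range k).foldl
      (fun mnum i =>
        (List.range 64).foldl
          (fun mn j => if cs.getD i ' ' = pvAlph.getD j ' ' then mn.set i (j : Int) else mn)
          mnum)
      (List.replicate cs.length 0)
      = (cs.take k).map encAltChar ++ List.replicate (cs.length - k) 0 := by
  induction k with
  | zero => simp
  | succ k ih =>
    have hk' : k < cs.length := hk
    rw [List.range_succ (n := k), List.foldl_append, ih (Nat.le_of_lt hk')]
    simp only [List.foldl_cons, List.foldl_nil]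
    have hgetD : cs.getD k ' ' = cs[k] := List.getD_eq_getElem cs ' ' hk'
    have hlen : ((cs.take k).map encAltChar).length = k := by
      simp [List.length_take, Nat.min_eq_left (Nat.le_of_lt hk')]
    have hrep : List.replicate (cs.length - k) (0 : Int)
        = 0 :: List.replicate (cs.length - (k + 1)) 0 := by
      have : cs.length - k = (cs.length - (k + 1)) + 1 := by omega
      rw [this, List.replicate_succ]
    have htake : cs.take (k + 1) = cs.take k ++ [cs[k]] := by
      rw [List.take_add_one]
      simp [List.getElem?_eq_getElem hk']
    by_cases hmem : cs[k] ∈ pvAlph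
    · rw [hgetD, pv_inner_mem cs[k] hmem]
      rw [List.set_append, if_neg (by omega), hlen, hrep, Nat.sub_self, List.set_cons_zero,
        htake, List.map_append, List.map_cons, List.map_nil]
      simp
    · rw [hgetD, pv_inner_keep cs[k] k _ _
        (fun j hj h => hmem (h ▸ pv_getD_mem j hj))]
      rw [hrep, htake, List.map_append, List.map_cons, List.map_nil, pv_alt_nomem cs[k] hmem]
      simp

-- ===== VERDICT (by name: the statement is the Claim_ definition above) =====
theorem encode64_spec : Claim_equal_encode64 := by
  intro m _
  unfold Spec_encode64 encode64 encode64_alt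
  rw [pv_outer m.toList m.toList.length (le_refl _)]
  simp
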